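-- pv_equiv track=rewrite | github.com/yutaokkots/Algorithms-and-Data-Structures | Data structures and Algorithms/Problems/leetcode/codesig_L03-013_reverseInParentheses.py | solution
-- ===== SOURCE A (Python) =====
-- def solution(inputString):
--     str_lst = list(inputString)
--     stack = []
--     for i in range(len(inputString)):
--         if inputString[i] == "(":
--             stack.append(i)
--             continue
--         if inputString[i] == ")":
--             opening_index = stack.pop()
--             sublst = str_lst[opening_index: i+ 1]
--             sublst.reverse()
--             str_lst[opening_index: i + 1] = sublst
--     answer = []
--     for n in str_lst:
--         if n != '(' and n != ')':
--             answer.append(n)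
--     return "".join(answer)
-- ===== SOURCE B (Python) =====
-- def solution(inputString):
--     stack = []
--     cur = []
--     for ch in inputString:
--         if ch == '(':
--             stack.append(cur)
--             cur = []
--         elif ch == ')':
--             prev = stack.pop()
--             prev.extend(reversed(cur))
--             cur = prev
--         else:
--             cur.append(ch)
--     while stack:
--         prev = stack.pop()
--         prev.extend(cur)
--         cur = prev
--     return "".join(cur)
-- ===== Notes on version B (the rewrite author's own statement) =====
-- stated objective: faster
-- what changed: A keeps an index stack and on every ')' reverses a slice of the whole character list in place, then makes a second pass stripping parens; B makes one pass keeping a stack of built buffers: '(' pushes the current buffer, ')' pops and appends the reversed current buffer, so there is no list surgery and no second filtering pass.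
import Mathlib
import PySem

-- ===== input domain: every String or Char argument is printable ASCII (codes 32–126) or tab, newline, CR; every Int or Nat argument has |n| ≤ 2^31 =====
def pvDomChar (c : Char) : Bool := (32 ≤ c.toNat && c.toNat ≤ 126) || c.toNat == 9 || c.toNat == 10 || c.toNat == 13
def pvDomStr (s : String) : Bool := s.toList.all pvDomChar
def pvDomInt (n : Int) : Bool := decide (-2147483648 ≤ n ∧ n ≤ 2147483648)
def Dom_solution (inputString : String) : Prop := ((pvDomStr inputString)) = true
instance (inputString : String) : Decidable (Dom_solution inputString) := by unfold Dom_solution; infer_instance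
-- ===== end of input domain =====

-- B replaces A's in-place slice reversals on the full character list (plus a final
-- paren-stripping pass) by one pass with a stack of built buffers; equivalence is
-- proved on all inputs where A does not raise (Pre_: no prefix with excess ')').

-- ===== PORT A =====
-- one iteration of A's `for i in range(len(inputString))` loop; state = (str_lst, stack)
def solAStep (l : List Char) (st : List Char × List Nat) (i : Nat) : List Char × List Nat :=
  match st with
  | (strLst, stack) =>
    if l.getD i ' ' = '(' then (strLst, stack ++ [i])
    else if l.getD i ' ' = ')' then
      -- Python's stack.pop() raises IndexError on an empty stack; such inputs are outside Pre_
      let opening := stack.getLast?.getD 0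
      let sublst := (strLst.drop opening).take (i + 1 - opening)
      (strLst.take opening ++ sublst.reverse ++ strLst.drop (i + 1), stack.dropLast)
    else (strLst, stack)

def solution (inputString : String) : String :=
  let l := inputString.toList
  let res := (List.range l.length).foldl (solAStep l) (l, [])
  -- A's answer loop: append every character that is not a parenthesis
  String.mk (res.1.foldl (fun acc n => if n != '(' && n != ')' then acc ++ [n] else acc) [])

-- ===== PORT B =====
-- one iteration of B's loop; state = (stack of saved buffers (top first), current buffer)
def solBStep (st : List (List Char) × List Char) (ch : Char) : List (List Char) × List Char :=
  match st with
  | (stack, cur) =>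
    if ch = '(' then (cur :: stack, [])
    else if ch = ')' then
      match stack with
      | [] => ([], cur)            -- Python's stack.pop() raises here; outside Pre_
      | prev :: rest => (rest, prev ++ cur.reverse)
    else (stack, cur ++ [ch])

def solution_alt (inputString : String) : String :=
  let res := inputString.toList.foldl solBStep ([], [])
  -- B's final `while stack:` loop prepends the remaining saved buffers
  String.mk (res.1.foldl (fun cur prev => prev ++ cur) res.2)

-- ===== PRECONDITION & SPEC =====
-- Pre_ excludes exactly the inputs on which A raises IndexError (a ')' with no matching '('):
-- every prefix must contain at least as many '(' as ')'.
def Pre_solution (inputString : String) : Prop :=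
  ∀ i ∈ List.range (inputString.toList.length + 1),
    (inputString.toList.take i).count ')' ≤ (inputString.toList.take i).count '('
instance (inputString : String) : Decidable (Pre_solution inputString) := by
  unfold Pre_solution; infer_instance

def pvWitness_solution : String := "a(bc)d"

def Spec_solution (inputString : String) (out : String) : Prop := out = solution_alt inputString
instance (inputString : String) (out : String) : Decidable (Spec_solution inputString out) := by unfold Spec_solution; infer_instance

-- ===== CLAIM (what is proved, stated in full; the proofs are below) =====
def Claim_equal_solution : Prop := ∀ (inputString : String), Dom_solution inputString → Pre_solution inputString → Spec_solution inputString (solution inputString)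

-- ===== LEMMAS AND PROOFS =====

-- strip parentheses
def pvFilt (L : List Char) : List Char := L.filter (fun c => c != '(' && c != ')')

lemma pvFilt_append (x y : List Char) : pvFilt (x ++ y) = pvFilt x ++ pvFilt y := by
  simp [pvFilt]

-- pvRel L i js bs cur: A's index stack js (top first), paired with B's buffer stack bs,
-- cuts L.take i into segments whose paren-stripped contents are exactly B's buffers.
def pvRel (L : List Char) : Nat → List Nat → List (List Char) → List Char → Prop
  | i, [], [], cur => cur = pvFilt (L.take i)
  | i, j :: js, b :: bs, cur => j ≤ i ∧ cur = pvFilt ((L.take i).drop j) ∧ pvRel L j js bs b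
  | _, _, _, _ => False

lemma pvRel_congr (L L' : List Char) (js : List Nat) :
    ∀ (i : Nat) (bs : List (List Char)) (cur : List Char),
    L.take i = L'.take i → pvRel L i js bs cur → pvRel L' i js bs cur := by
  induction js with
  | nil =>
      intro i bs cur h hr
      cases bs with
      | nil => simp only [pvRel] at hr ⊢; rw [← h]; exact hr
      | cons b bs => simp [pvRel] at hr
  | cons j js ih =>
      intro i bs cur h hr
      cases bs with
      | nil => simp [pvRel] at hr
      | cons b bs =>
          obtain ⟨hj, hcur, hrec⟩ := hr
          refine ⟨hj, by rw [hcur, h], ih j bs b ?_ hrec⟩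
          have h1 : L.take j = (L.take i).take j := by
            rw [List.take_take, Nat.min_eq_left hj]
          have h2 : L'.take j = (L'.take i).take j := by
            rw [List.take_take, Nat.min_eq_left hj]
          rw [h1, h2, h]

lemma pvFoldl_prepend (bs : List (List Char)) :
    ∀ (x y : List Char), bs.foldl (fun cur prev => prev ++ cur) (x ++ y)
      = bs.foldl (fun cur prev => prev ++ cur) x ++ y := by
  induction bs with
  | nil => intro x y; rfl
  | cons b bs ih => intro x y; rw [List.foldl_cons, List.foldl_cons, ← List.append_assoc]; exact ih (b ++ x) y

lemma pvRel_flatten (L : List Char) (js : List Nat) :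
    ∀ (i : Nat) (bs : List (List Char)) (cur : List Char), pvRel L i js bs cur →
      bs.foldl (fun cur prev => prev ++ cur) cur = pvFilt (L.take i) := by
  induction js with
  | nil =>
      intro i bs cur hr
      cases bs with
      | nil => simpa [pvRel] using hr
      | cons b bs => simp [pvRel] at hr
  | cons j js ih =>
      intro i bs cur hr
      cases bs with
      | nil => simp [pvRel] at hr
      | cons b bs =>
          obtain ⟨hj, hcur, hrec⟩ := hr
          have hsplit : L.take j ++ (L.take i).drop j = L.take i := by
            conv_rhs => rw [← List.take_append_drop j (L.take i)]
            rw [List.take_take, Nat.min_eq_left hj]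
          calc (b :: bs).foldl (fun cur prev => prev ++ cur) cur
              = bs.foldl (fun cur prev => prev ++ cur) (b ++ cur) := rfl
            _ = bs.foldl (fun cur prev => prev ++ cur) b ++ cur := pvFoldl_prepend bs b cur
            _ = pvFilt (L.take j) ++ cur := by rw [ih j bs b hrec]
            _ = pvFilt (L.take i) := by rw [hcur, ← pvFilt_append, hsplit]

-- main loop invariant
lemma pvLoopInv (l : List Char)
    (hPre : ∀ i, i ≤ l.length → (l.take i).count ')' ≤ (l.take i).count '(') :
    ∀ m, m ≤ l.length →
      ((List.range m).foldl (solAStep l) (l, [])).1.length = l.length ∧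
      ((List.range m).foldl (solAStep l) (l, [])).1.drop m = l.drop m ∧
      ((List.range m).foldl (solAStep l) (l, [])).2.length + (l.take m).count ')' = (l.take m).count '(' ∧
      pvRel ((List.range m).foldl (solAStep l) (l, [])).1 m
          ((List.range m).foldl (solAStep l) (l, [])).2.reverse
          ((l.take m).foldl solBStep ([], [])).1
          ((l.take m).foldl solBStep ([], [])).2 := by
  intro m
  induction m with
  | zero => intro _; refine ⟨rfl, rfl, by simp, by simp [pvRel, pvFilt]⟩
  | succ m ih =>
      intro hm1
      have hm : m < l.length := hm1
      have hPreS := hPre (m+1) hm1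
      have htake1 : l.take (m+1) = l.take m ++ [l[m]] := by
        rw [List.take_add_one, List.getElem?_eq_getElem hm, Option.toList_some]
      have hgd' : l[m]?.getD ' ' = l[m] := by rw [List.getElem?_eq_getElem hm]; rfl
      rw [htake1] at hPreS
      rw [List.range_succ, List.foldl_append, List.foldl_cons, List.foldl_nil,
        htake1, List.foldl_append, List.foldl_cons, List.foldl_nil]
      revert ih
      generalize (List.range m).foldl (solAStep l) (l, ([] : List Nat)) = pA
      generalize (l.take m).foldl solBStep ([], ([] : List Char)) = pB
      obtain ⟨L, st⟩ := pA
      obtain ⟨sb, cur⟩ := pB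
      intro ih
      obtain ⟨hlen, hdrop, hcnt, hrel⟩ := ih (Nat.le_of_lt hm)
      dsimp only at hlen hdrop hcnt hrel ⊢
      have hLm : L[m]? = l[m]? := by
        have h0 := congrArg (fun t => t[0]?) hdrop
        simpa using h0
      have htakeL1 : L.take (m+1) = L.take m ++ [l[m]] := by
        rw [List.take_add_one, hLm, List.getElem?_eq_getElem hm, Option.toList_some]
      have hdrop1 : L.drop (m+1) = l.drop (m+1) := by
        have h1 : (L.drop m).drop 1 = (l.drop m).drop 1 := by rw [hdrop]
        rwa [List.drop_drop, List.drop_drop] at h1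
      have hlenTakeM : (L.take m).length = m := by
        rw [List.length_take, hlen]; omega
      by_cases hc1 : l[m] = '('
      · -- push case
        have hA2 : solAStep l (L, st) m = (L, st ++ [m]) := by
          simp [solAStep, hgd', hc1]
        have hB2 : solBStep (sb, cur) l[m] = (cur :: sb, []) := by simp [solBStep, hc1]
        rw [hA2, hB2]
        dsimp only
        refine ⟨hlen, hdrop1, ?_, ?_⟩
        · simp only [List.count_append, List.length_append, List.length_cons,
            List.length_nil, hc1]
          have e1 : List.count ')' ['('] = 0 := by decide
          have e2 : List.count '(' ['('] = 1 := by decide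
          rw [e1, e2]; omega
        · rw [List.reverse_append, List.reverse_singleton, List.singleton_append]
          refine ⟨Nat.le_succ m, ?_, hrel⟩
          have hseg : (L.take (m+1)).drop m = ['('] := by
            rw [htakeL1, hc1, List.drop_append_of_le_length (by omega),
              List.drop_eq_nil_of_le (by omega), List.nil_append]
          rw [hseg]; decide
      · by_cases hc2 : l[m] = ')'
        · -- pop/reverse case
          have hstne : st ≠ [] := by
            intro h0
            rw [hc2] at hPreS
            simp only [List.count_append] at hPreS
            have e1 : List.count ')' [')'] = 1 := by decide
            have e2 : List.count '(' [')'] = 0 := by decide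
            rw [e1, e2] at hPreS
            rw [h0] at hcnt
            simp at hcnt
            omega
          cases hrev : st.reverse with
          | nil => exact absurd (List.reverse_eq_nil_iff.mp hrev) hstne
          | cons j js =>
            rw [hrev] at hrel
            cases sb with
            | nil => simp [pvRel] at hrel
            | cons b bs =>
              obtain ⟨hj, hcurL, hrec⟩ := hrel
              have hstv : st = js.reverse ++ [j] := by
                simpa using congrArg List.reverse hrev
              have hA2 : solAStep l (L, st) m =
                  (L.take j ++ ((L.drop j).take (m + 1 - j)).reverse ++ L.drop (m+1), js.reverse) := by
                simp [solAStep, hgd', hc2, hstv]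
              have hB2 : solBStep (b :: bs, cur) l[m] = (bs, b ++ cur.reverse) := by
                simp [solBStep, hc2]
              rw [hA2, hB2]
              dsimp only
              simp only [List.reverse_reverse]
              have hsub : (L.drop j).take (m + 1 - j) = (L.take (m+1)).drop j := List.drop_take.symm
              have hseg : (L.take (m+1)).drop j = (L.take m).drop j ++ [')'] := by
                rw [htakeL1, hc2, List.drop_append_of_le_length (by omega)]
              have hrevseg : ((L.drop j).take (m + 1 - j)).reverse
                  = ')' :: ((L.take m).drop j).reverse := by
                rw [hsub, hseg, List.reverse_append, List.reverse_singleton, List.singleton_append]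
              have hfiltrev : pvFilt (((L.drop j).take (m + 1 - j)).reverse) = cur.reverse := by
                rw [hrevseg]
                have h1 : pvFilt (')' :: ((L.take m).drop j).reverse)
                    = pvFilt (((L.take m).drop j).reverse) := by simp [pvFilt]
                have h2 : pvFilt (((L.take m).drop j).reverse)
                    = (pvFilt ((L.take m).drop j)).reverse := by simp [pvFilt]
                rw [h1, h2, ← hcurL]
              have hfrontlen : (L.take j ++ ((L.drop j).take (m + 1 - j)).reverse).length = m + 1 := by
                rw [List.length_append, List.length_reverse, List.length_take, List.length_take,
                  List.length_drop, hlen]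
                omega
              have hL' : L.take j ++ ((L.drop j).take (m + 1 - j)).reverse ++ L.drop (m+1)
                  = (L.take j ++ ((L.drop j).take (m + 1 - j)).reverse) ++ L.drop (m+1) := by
                rw [List.append_assoc]
              have htakeL' : (L.take j ++ ((L.drop j).take (m + 1 - j)).reverse ++ L.drop (m+1)).take (m+1)
                  = L.take j ++ ((L.drop j).take (m + 1 - j)).reverse := by
                rw [hL', List.take_left' hfrontlen]
              have hdropL' : (L.take j ++ ((L.drop j).take (m + 1 - j)).reverse ++ L.drop (m+1)).drop (m+1)
                  = L.drop (m+1) := by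
                rw [hL', List.drop_left' hfrontlen]
              refine ⟨?_, ?_, ?_, ?_⟩
              · rw [List.length_append, List.length_append, List.length_reverse, List.length_take,
                  List.length_take, List.length_drop, List.length_drop, hlen]
                omega
              · rw [hdropL', hdrop1]
              · rw [hstv] at hcnt
                simp only [List.length_append, List.length_reverse, List.length_cons,
                  List.length_nil] at hcnt
                simp only [hc2, List.count_append, List.length_reverse]
                have e1 : List.count ')' [')'] = 1 := by decide
                have e2 : List.count '(' [')'] = 0 := by decide
                rw [e1, e2]; omega
              · -- pvRel for the merged segment
                cases js with
                | nil =>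
                  cases bs with
                  | cons b' bs' => simp [pvRel] at hrec
                  | nil =>
                    have hb : b = pvFilt (L.take j) := hrec
                    show b ++ cur.reverse = pvFilt _
                    rw [htakeL', pvFilt_append, hfiltrev, hb]
                | cons j' js' =>
                  cases bs with
                  | nil => simp [pvRel] at hrec
                  | cons b' bs' =>
                    obtain ⟨hj', hb, hrec'⟩ := hrec
                    have hjlen : (L.take j).length = j := by
                      rw [List.length_take, hlen]; omega
                    refine ⟨by omega, ?_, ?_⟩
                    · rw [htakeL', List.drop_append_of_le_length (by omega), pvFilt_append,
                        hfiltrev, ← hb]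
                    · refine pvRel_congr L _ js' j' bs' b' ?_ hrec'
                      rw [hL']
                      rw [List.take_append_of_le_length (by omega),
                        List.take_append_of_le_length (by omega), List.take_take,
                        Nat.min_eq_left hj']
        · -- ordinary character
          have hA2 : solAStep l (L, st) m = (L, st) := by
            simp [solAStep, hgd', hc1, hc2]
          have hB2 : solBStep (sb, cur) l[m] = (sb, cur ++ [l[m]]) := by
            simp [solBStep, hc1, hc2]
          rw [hA2, hB2]
          dsimp only
          have hbc : (l[m] != '(' && l[m] != ')') = true := by
            simp [hc1, hc2]
          have hfiltc : pvFilt [l[m]] = [l[m]] := by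
            simp [pvFilt, hbc]
          refine ⟨hlen, hdrop1, ?_, ?_⟩
          · simp only [List.count_append]
            have e1 : List.count ')' [l[m]] = 0 := by
              simp [hc2]
            have e2 : List.count '(' [l[m]] = 0 := by
              simp [hc1]
            rw [e1, e2]; omega
          · cases hrev : st.reverse with
            | nil =>
              rw [hrev] at hrel
              cases sb with
              | cons b bs => simp [pvRel] at hrel
              | nil =>
                have hc : cur = pvFilt (L.take m) := hrel
                show cur ++ [l[m]] = pvFilt (L.take (m+1))
                rw [htakeL1, pvFilt_append, hfiltc, hc]
            | cons j js =>
              rw [hrev] at hrel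
              cases sb with
              | nil => simp [pvRel] at hrel
              | cons b bs =>
                obtain ⟨hj, hcurL, hrec⟩ := hrel
                refine ⟨by omega, ?_, hrec⟩
                rw [htakeL1, List.drop_append_of_le_length (by omega), pvFilt_append,
                  hfiltc, hcurL]

-- ===== VERDICT (by name: the statement is the Claim_ definition above) =====
theorem solution_spec : Claim_equal_solution := by
  intro s _ hpre
  have hPre' : ∀ i, i ≤ s.toList.length →
      (s.toList.take i).count ')' ≤ (s.toList.take i).count '(' := by
    intro i hi
    exact hpre i (List.mem_range.mpr (Nat.lt_succ_of_le hi))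
  obtain ⟨hlen, _, _, hrel⟩ := pvLoopInv s.toList hPre' s.toList.length le_rfl
  have h1 := pvRel_flatten _ _ _ _ _ hrel
  have hLt : ((List.range s.toList.length).foldl (solAStep s.toList) (s.toList, [])).1.take s.toList.length
      = ((List.range s.toList.length).foldl (solAStep s.toList) (s.toList, [])).1 :=
    List.take_of_length_le (le_of_eq hlen)
  have ht : s.toList.take s.toList.length = s.toList := List.take_length
  rw [hLt, ht] at h1
  have eA : solution s = String.mk
      ((((List.range s.toList.length).foldl (solAStep s.toList) (s.toList, [])).1).foldl
        (fun acc n => if n != '(' && n != ')' then acc ++ [n] else acc) []) := rfl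
  have eB : solution_alt s = String.mk
      (((s.toList.foldl solBStep ([], [])).1).foldl (fun cur prev => prev ++ cur)
        (s.toList.foldl solBStep ([], [])).2) := rfl
  show solution s = solution_alt s
  rw [eA, eB, PySem.List.foldl_append_if_eq_filter, List.nil_append, h1]
  rfl
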